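-- pv_equiv track=rewrite | github.com/BioRhythmLTC/ltc-business-10-rhythm | scripts/auto_docstrings.py | _summary_from_name
-- ===== SOURCE A (Python) =====
-- def _snake_to_words(name: str) -> str:
--     """Snake to words.
--
--     Args:
--         name: Parameter.
--
--     Returns:
--         Return value.
--     """
--     return " ".join(part for part in name.replace("_", " ").split() if part)
--
-- def _summary_from_name(name: str) -> str:
--     """Summary from name.
--
--     Args:
--         name: Parameter.
--
--     Returns:
--         Return value.
--     """
--     words = _snake_to_words(name)
--     lower = words.lower()
--     verbs = [
--         ("get", "Get"),
--         ("set", "Set"),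
--         ("load", "Load"),
--         ("save", "Save"),
--         ("read", "Read"),
--         ("write", "Write"),
--         ("build", "Build"),
--         ("make", "Make"),
--         ("create", "Create"),
--         ("update", "Update"),
--         ("delete", "Delete"),
--         ("compute", "Compute"),
--         ("calculate", "Calculate"),
--         ("encode", "Encode"),
--         ("decode", "Decode"),
--         ("align", "Align"),
--         ("map", "Map"),
--         ("merge", "Merge"),
--         ("normalize", "Normalize"),
--         ("predict", "Predict"),
--         ("find", "Find"),
--         ("extract", "Extract"),
--         ("evaluate", "Evaluate"),
--         ("run", "Run"),
--         ("process", "Process"),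
--         ("select", "Select"),
--         ("ensure", "Ensure"),
--     ]
--     for key, verb in verbs:
--         if lower.startswith(key + " ") or lower == key:
--             rest = words[len(key) :].strip()
--             return (verb + (" " + rest if rest else "") + ".").strip()
--     return (words.capitalize() + ".") if words else "Perform operation."
-- ===== SOURCE B (Python) =====
-- _VERBS = frozenset(
--     "get set load save read write build make create update delete compute "
--     "calculate encode decode align map merge normalize predict find extract "
--     "evaluate run process select ensure".split())
--
--
-- def _summary_from_name(name: str) -> str:
--     tokens = name.replace("_", " ").split()
--     if not tokens:
--         return "Perform operation."
--     head, *rest = tokens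
--     low = head.lower()
--     if low in _VERBS:
--         return " ".join([low.capitalize()] + rest) + "."
--     return " ".join([head.capitalize()] + [t.lower() for t in rest]) + "."
-- ===== Notes on version B (the rewrite author's own statement) =====
-- stated objective: simpler
-- what changed: B works on the token list directly: split once, classify the first token's lowercase form by membership in a verb set, and rebuild the sentence by joining tokens - no reconstructed words string, no 27 startswith tests, no slicing or stripping.
import Mathlib
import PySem

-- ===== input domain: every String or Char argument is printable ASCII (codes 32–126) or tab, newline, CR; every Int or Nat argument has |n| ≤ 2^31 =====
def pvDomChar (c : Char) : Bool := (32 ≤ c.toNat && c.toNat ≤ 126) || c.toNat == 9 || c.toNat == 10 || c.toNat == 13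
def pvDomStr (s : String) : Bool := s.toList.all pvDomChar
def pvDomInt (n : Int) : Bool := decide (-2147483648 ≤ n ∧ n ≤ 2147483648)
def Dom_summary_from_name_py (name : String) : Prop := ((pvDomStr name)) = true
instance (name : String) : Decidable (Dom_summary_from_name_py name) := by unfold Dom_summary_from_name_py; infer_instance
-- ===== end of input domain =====

-- B is simpler: it splits once into tokens, classifies the lowercased first token by
-- membership in a verb set, and rejoins the tokens — no rebuilt words string, no 27
-- startswith tests, no slicing/stripping; same return value on every input.

-- ===== PORT A =====
-- shared module helper _snake_to_words
def snakeToWords (name : String) : List Char :=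
  PySem.Chars.join [' ']
    ((PySem.Chars.split₀ (PySem.Chars.replace name.toList ['_'] [' '])).filter
      (fun part => !part.isEmpty))

-- str.capitalize(): first char uppercased, rest lowered — hand port, exact on ASCII
def pyCapitalize : List Char → List Char
  | [] => []
  | c :: cs => PySem.Chars.upperChar c :: PySem.Chars.lower cs

def verbsA : List (List Char × List Char) :=
  [("get".toList, "Get".toList), ("set".toList, "Set".toList), ("load".toList, "Load".toList),
   ("save".toList, "Save".toList), ("read".toList, "Read".toList), ("write".toList, "Write".toList),
   ("build".toList, "Build".toList), ("make".toList, "Make".toList), ("create".toList, "Create".toList),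
   ("update".toList, "Update".toList), ("delete".toList, "Delete".toList), ("compute".toList, "Compute".toList),
   ("calculate".toList, "Calculate".toList), ("encode".toList, "Encode".toList), ("decode".toList, "Decode".toList),
   ("align".toList, "Align".toList), ("map".toList, "Map".toList), ("merge".toList, "Merge".toList),
   ("normalize".toList, "Normalize".toList), ("predict".toList, "Predict".toList), ("find".toList, "Find".toList),
   ("extract".toList, "Extract".toList), ("evaluate".toList, "Evaluate".toList), ("run".toList, "Run".toList),
   ("process".toList, "Process".toList), ("select".toList, "Select".toList), ("ensure".toList, "Ensure".toList)]

-- the 'for key, verb in verbs' loop with its early return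
def loopA (words lower : List Char) : List (List Char × List Char) → Option (List Char)
  | [] => none
  | p :: vs =>
    if PySem.Chars.startswith lower (p.1 ++ [' ']) || lower == p.1 then
      some (PySem.Chars.strip (p.2 ++
        (if PySem.Chars.strip (PySem.List.slice words (some (p.1.length : Int)) none) ≠ [] then
           ' ' :: PySem.Chars.strip (PySem.List.slice words (some (p.1.length : Int)) none)
         else []) ++ ['.']))
    else loopA words lower vs

def aCore (words : List Char) : String :=
  let lower := PySem.Chars.lower words
  match loopA words lower verbsA with
  | some r => String.ofList r
  | none => if words ≠ [] then String.ofList (pyCapitalize words ++ ['.']) else "Perform operation."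

def summary_from_name_py (name : String) : String :=
  aCore (snakeToWords name)

-- ===== PORT B =====
-- _VERBS = frozenset("get set … ensure".split())
def verbSet : PySem.Set (List Char) :=
  PySem.Set.ofList
    ["get".toList, "set".toList, "load".toList, "save".toList, "read".toList, "write".toList,
     "build".toList, "make".toList, "create".toList, "update".toList, "delete".toList, "compute".toList,
     "calculate".toList, "encode".toList, "decode".toList, "align".toList, "map".toList, "merge".toList,
     "normalize".toList, "predict".toList, "find".toList, "extract".toList, "evaluate".toList, "run".toList,
     "process".toList, "select".toList, "ensure".toList]

def summary_from_name_py_alt (name : String) : String :=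
  match PySem.Chars.split₀ (PySem.Chars.replace name.toList ['_'] [' ']) with
  | [] => "Perform operation."
  | head :: rest =>
    let low := PySem.Chars.lower head
    if PySem.Set.contains verbSet low then
      String.ofList (PySem.Chars.join [' '] (pyCapitalize low :: rest) ++ ['.'])
    else
      String.ofList (PySem.Chars.join [' '] (pyCapitalize head :: rest.map PySem.Chars.lower) ++ ['.'])

-- ===== PRECONDITION & SPEC =====
def Spec_summary_from_name_py (name : String) (out : String) : Prop := out = summary_from_name_py_alt name
instance (name : String) (out : String) : Decidable (Spec_summary_from_name_py name out) := by unfold Spec_summary_from_name_py; infer_instance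

-- ===== CLAIM (what is proved, stated in full; the proofs are below) =====
def Claim_equal_summary_from_name_py : Prop := ∀ (name : String), Dom_summary_from_name_py name → Spec_summary_from_name_py name (summary_from_name_py name)

-- ===== LEMMAS AND PROOFS =====

-- a token of str.split(): nonempty and whitespace-free
def goodTok (t : List Char) : Prop := t ≠ [] ∧ ∀ c ∈ t, PySem.Chars.isspace c = false

lemma split₀_go_good (s : List Char) : ∀ cur acc,
    (∀ c ∈ cur, PySem.Chars.isspace c = false) → (∀ t ∈ acc, goodTok t) →
    ∀ t ∈ PySem.Chars.split₀.go s cur acc, goodTok t := by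
  induction s with
  | nil =>
    intro cur acc hcur hacc t ht
    rw [PySem.Chars.split₀.go] at ht
    split at ht
    · exact hacc t (by simpa using ht)
    · rcases (by simpa using ht : t ∈ acc ∨ t = cur.reverse) with h | h
      · exact hacc t h
      · subst h
        refine ⟨by simpa [List.isEmpty_iff] using ‹¬ cur.isEmpty = true›, ?_⟩
        intro c hc; exact hcur c (by simpa using hc)
  | cons c rest ih =>
    intro cur acc hcur hacc t ht
    rw [PySem.Chars.split₀.go] at ht
    split at ht
    · split at ht
      · exact ih [] acc (by simp) hacc t ht
      · refine ih [] (cur.reverse :: acc) (by simp) ?_ t ht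
        intro u hu
        rcases List.mem_cons.mp hu with rfl | hu
        · refine ⟨by simpa [List.isEmpty_iff] using ‹¬ cur.isEmpty = true›, ?_⟩
          intro d hd; exact hcur d (by simpa using hd)
        · exact hacc u hu
    · refine ih (c :: cur) acc ?_ hacc t ht
      intro d hd
      rcases List.mem_cons.mp hd with rfl | hd
      · simp_all
      · exact hcur d hd

lemma split₀_good (s : List Char) : ∀ t ∈ PySem.Chars.split₀ s, goodTok t :=
  split₀_go_good s [] [] (by simp) (by simp)

-- join of good tokens ends in a non-space char
lemma join_last_good (ts : List (List Char)) (h : ∀ t ∈ ts, goodTok t) (hne : ts ≠ []) :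
    ∃ x c, PySem.Chars.join [' '] ts = x ++ [c] ∧ PySem.Chars.isspace c = false := by
  induction ts with
  | nil => exact absurd rfl hne
  | cons t ts ih =>
    rcases ts with _ | ⟨u, ts'⟩
    · have ht := h t (by simp)
      refine ⟨t.dropLast, t.getLast ht.1, ?_, ht.2 _ (List.getLast_mem ht.1)⟩
      rw [PySem.Chars.join_singleton, List.dropLast_append_getLast ht.1]
    · rcases ih (fun u hu => h u (by simp [hu])) (by simp) with ⟨x, c, hx, hc⟩
      refine ⟨t ++ ' ' :: x, c, ?_, hc⟩
      rw [PySem.Chars.join_cons_cons, hx]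
      simp

lemma strip_cons_append (c : Char) (x : List Char) (d : Char)
    (hc : PySem.Chars.isspace c = false) (hd : PySem.Chars.isspace d = false) :
    PySem.Chars.strip (c :: (x ++ [d])) = c :: (x ++ [d]) := by
  simp [PySem.Chars.strip, PySem.Chars.lstrip, PySem.Chars.rstrip, hc, hd]

lemma lstrip_cons_of (a : Char) (l : List Char) (ha : PySem.Chars.isspace a = false) :
    PySem.Chars.lstrip (a :: l) = a :: l := by
  simp [PySem.Chars.lstrip, ha]

lemma rstrip_append_singleton (x : List Char) (c : Char) (hc : PySem.Chars.isspace c = false) :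
    PySem.Chars.rstrip (x ++ [c]) = x ++ [c] := by
  simp [PySem.Chars.rstrip, hc]

lemma strip_join (ts : List (List Char)) (h : ∀ t ∈ ts, goodTok t) :
    PySem.Chars.strip (PySem.Chars.join [' '] ts) = PySem.Chars.join [' '] ts := by
  rcases ts with _ | ⟨t, ts'⟩
  · decide
  · rcases join_last_good (t :: ts') h (by simp) with ⟨x, c, hx, hc⟩
    have ht := h t (by simp)
    rcases t with _ | ⟨a, t'⟩
    · exact absurd rfl ht.1
    have ha : PySem.Chars.isspace a = false := ht.2 a (by simp)
    have hjoin : ∃ l, PySem.Chars.join [' '] ((a :: t') :: ts') = a :: l := by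
      rcases ts' with _ | _ <;>
        simp [PySem.Chars.join_singleton, PySem.Chars.join_cons_cons]
    rcases hjoin with ⟨l, hl⟩
    rw [PySem.Chars.strip, hl, lstrip_cons_of a l ha, ← hl, hx,
      rstrip_append_singleton x c hc]

lemma strip_space_cons (l : List Char) :
    PySem.Chars.strip (' ' :: l) = PySem.Chars.strip l := by
  simp [PySem.Chars.strip, PySem.Chars.lstrip]
  rfl

lemma lowerChar_ne_space (c : Char) (h : PySem.Chars.isspace c = false) :
    (PySem.Chars.lowerChar c != ' ') = true := by
  simp only [PySem.Chars.lowerChar, PySem.Chars.isupper]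
  split
  · rename_i hu
    have hb : 65 ≤ c.toNat ∧ c.toNat ≤ 90 := by
      simp only [Bool.and_eq_true, decide_eq_true_eq, Char.le_def] at hu
      exact ⟨hu.1, hu.2⟩
    simp only [bne_iff_ne, ne_eq]
    intro he
    have h32 : (Char.ofNat (c.toNat + 32)).toNat = 32 := by rw [he]; rfl
    rw [Char.toNat_ofNat, if_pos (Or.inl (by omega))] at h32
    omega
  · simp only [bne_iff_ne, ne_eq]
    intro rfl
    simp [PySem.Chars.isspace] at h

-- shape of 'sep.join(t :: r)'
lemma join_cons (h : List Char) (r : List (List Char)) :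
    PySem.Chars.join [' '] (h :: r) =
      h ++ (if r = [] then [] else ' ' :: PySem.Chars.join [' '] r) := by
  rcases r with _ | _ <;>
    simp [PySem.Chars.join_singleton, PySem.Chars.join_cons_cons]

lemma join_ne_nil (ts : List (List Char)) (h : ∀ t ∈ ts, goodTok t) (hne : ts ≠ []) :
    PySem.Chars.join [' '] ts ≠ [] := by
  rcases join_last_good ts h hne with ⟨x, c, hx, _⟩
  simp [hx]

lemma lower_join (ts : List (List Char)) :
    PySem.Chars.lower (PySem.Chars.join [' '] ts) =
      PySem.Chars.join [' '] (ts.map PySem.Chars.lower) := by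
  induction ts with
  | nil => rfl
  | cons t ts ih =>
    rcases ts with _ | ⟨u, ts'⟩
    · simp [PySem.Chars.join_singleton]
    · have hsp : PySem.Chars.lowerChar ' ' = ' ' := by decide
      rw [PySem.Chars.join_cons_cons]
      have h1 : PySem.Chars.lower (t ++ [' '] ++ PySem.Chars.join [' '] (u :: ts')) =
          PySem.Chars.lower t ++ [' '] ++
            PySem.Chars.lower (PySem.Chars.join [' '] (u :: ts')) := by
        simp [PySem.Chars.lower, hsp]
      rw [h1, ih]
      simp only [List.map_cons]
      rw [PySem.Chars.join_cons_cons]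

-- the first space-delimited token of the lowered words string is the lowered head token
lemma first_token (head : List Char) (rest : List (List Char))
    (hg : ∀ t ∈ head :: rest, goodTok t) :
    (PySem.Chars.lower (PySem.Chars.join [' '] (head :: rest))).takeWhile
        (fun c => c != ' ') = PySem.Chars.lower head := by
  have hh := hg head (by simp)
  have hfree : ∀ a ∈ PySem.Chars.lower head, (a != ' ') = true := by
    intro a ha
    rcases List.mem_map.mp ha with ⟨b, hb, rfl⟩
    exact lowerChar_ne_space b (hh.2 b hb)
  rw [lower_join, List.map_cons, join_cons]
  rcases rest with _ | _
  · simpa using List.takeWhile_eq_self_iff.mpr hfree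
  · rw [if_neg (by simp), List.takeWhile_append_of_pos hfree]
    simp

-- A's per-key test 'lower.startswith(key + " ") or lower == key' for a space-free key
-- is exactly 'the first space-delimited token of lower equals key'
lemma cond_iff (lower key : List Char) (hk : ' ' ∉ key) :
    (PySem.Chars.startswith lower (key ++ [' ']) || lower == key)
      = (lower.takeWhile (fun c => c != ' ') == key) := by
  have hall : ∀ a ∈ key, (a != ' ') = true := by
    intro a ha; simp only [bne_iff_ne, ne_eq]; rintro rfl; exact hk ha
  rcases h : (lower.takeWhile (fun c => c != ' ') == key) with _ | _
  · rw [Bool.or_eq_false_iff]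
    constructor
    · by_contra hs
      rw [Bool.not_eq_false, PySem.Chars.startswith_iff] at hs
      rcases hs with ⟨t, ht⟩
      rw [List.append_assoc] at ht
      have : (key ++ ([' '] ++ t)).takeWhile (fun c => c != ' ') = key := by
        rw [List.takeWhile_append_of_pos hall]; simp
      rw [← ht, this] at h
      simp at h
    · by_contra he
      rw [Bool.not_eq_false, beq_iff_eq] at he
      subst he
      rw [List.takeWhile_eq_self_iff.mpr hall] at h
      simp at h
  · rw [beq_iff_eq] at h
    have hsplit := List.takeWhile_append_dropWhile (p := fun c => c != ' ') (l := lower)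
    rw [h] at hsplit
    rcases hd : lower.dropWhile (fun c => c != ' ') with _ | ⟨c, cs⟩
    · rw [hd] at hsplit
      simp only [List.append_nil] at hsplit
      simp [← hsplit]
    · have hc : (fun c => c != ' ') c = false := by
        have := List.head_dropWhile_not (fun c => c != ' ') (l := lower) (by rw [hd]; simp)
        simpa [hd] using this
      have hc' : c = ' ' := by simpa using hc
      rw [hd, hc'] at hsplit
      have : PySem.Chars.startswith lower (key ++ [' ']) = true := by
        rw [PySem.Chars.startswith_iff, ← hsplit]
        exact ⟨cs, by simp⟩
      simp [this]

-- the loop over the verb table is a find? on the first token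
lemma loopA_eq (words lower : List Char) (vs : List (List Char × List Char))
    (hvs : ∀ p ∈ vs, ' ' ∉ p.1) :
    loopA words lower vs =
      (vs.find? (fun p => lower.takeWhile (fun c => c != ' ') == p.1)).map
        (fun p => PySem.Chars.strip (p.2 ++
          (if PySem.Chars.strip (PySem.List.slice words (some (p.1.length : Int)) none) ≠ [] then
             ' ' :: PySem.Chars.strip (PySem.List.slice words (some (p.1.length : Int)) none)
           else []) ++ ['.'])) := by
  induction vs with
  | nil => rfl
  | cons p vs ih =>
    rw [loopA, List.find?_cons, cond_iff lower p.1 (hvs p (by simp))]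
    rcases hc : (lower.takeWhile (fun c => c != ' ') == p.1) with _ | _
    · simpa using ih (fun q hq => hvs q (by simp [hq]))
    · simp

-- 'what A slices and strips after the matched verb' is exactly 'the joined tail tokens'
lemma strip_tail (head : List Char) (rest : List (List Char))
    (hg : ∀ t ∈ head :: rest, goodTok t) :
    PySem.Chars.strip
        (PySem.List.slice (PySem.Chars.join [' '] (head :: rest))
          (some (head.length : Int)) none) =
      PySem.Chars.join [' '] rest := by
  rw [join_cons, PySem.List.slice_from_natCast, List.drop_left]
  rcases rest with _ | ⟨u, ts'⟩
  · decide
  · rw [if_neg (by simp), strip_space_cons]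
    exact strip_join _ (fun t ht => hg t (by simp [ht]))

-- str.capitalize() of the joined words, computed token-wise
lemma capitalize_join (head : List Char) (rest : List (List Char)) (hne : head ≠ []) :
    pyCapitalize (PySem.Chars.join [' '] (head :: rest)) =
      PySem.Chars.join [' '] (pyCapitalize head :: rest.map PySem.Chars.lower) := by
  have hsp : PySem.Chars.lowerChar ' ' = ' ' := by decide
  rcases head with _ | ⟨a, h'⟩
  · exact absurd rfl hne
  rw [join_cons, join_cons]
  rcases rest with _ | ⟨u, ts'⟩
  · simp [pyCapitalize]
  · rw [if_neg (by simp), if_neg (by simp), ← lower_join]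
    simp [pyCapitalize, PySem.Chars.lower, hsp]

lemma verbSet_keys : verbSet = verbsA.map Prod.fst := by decide

lemma core_eq_cons (head : List Char) (rest : List (List Char))
    (hg : ∀ t ∈ head :: rest, goodTok t) :
    aCore (PySem.Chars.join [' '] (head :: rest)) =
      (if PySem.Set.contains verbSet (PySem.Chars.lower head) then
         String.ofList (PySem.Chars.join [' ']
           (pyCapitalize (PySem.Chars.lower head) :: rest) ++ ['.'])
       else
         String.ofList (PySem.Chars.join [' ']
           (pyCapitalize head :: rest.map PySem.Chars.lower) ++ ['.'])) := by
  have hvs : ∀ p ∈ verbsA, ' ' ∉ p.1 := by decide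
  have hcap : ∀ p ∈ verbsA, p.2 = pyCapitalize p.1 := by decide
  have hp2 : ∀ p ∈ verbsA, p.2 ≠ [] ∧ PySem.Chars.isspace p.2.headI = false := by decide
  have hhead := hg head (by simp)
  unfold aCore
  simp only [loopA_eq _ _ verbsA hvs]
  have hpred : (fun p : List Char × List Char =>
      ((PySem.Chars.lower (PySem.Chars.join [' '] (head :: rest))).takeWhile
        (fun c => c != ' ') == p.1))
      = (fun p : List Char × List Char => PySem.Chars.lower head == p.1) := by
    funext p; rw [first_token head rest hg]
  rw [hpred]
  rcases hf : verbsA.find? (fun p : List Char × List Char => PySem.Chars.lower head == p.1)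
    with _ | p
  · -- no verb matches
    have hnone := List.find?_eq_none.mp hf
    have hcont : ¬ PySem.Set.contains verbSet (PySem.Chars.lower head) = true := by
      intro hco
      rw [verbSet_keys] at hco
      have hm : PySem.Chars.lower head ∈ verbsA.map Prod.fst := by
        simpa [PySem.Set.contains] using hco
      rcases List.mem_map.mp hm with ⟨p, hp, hpe⟩
      exact hnone p hp (by simp [hpe])
    rw [if_neg hcont]
    simp only [Option.map_none]
    rw [if_pos (join_ne_nil (head :: rest) hg (by simp)), capitalize_join head rest hhead.1]
  · -- first token is a verb key
    have hpmem := List.mem_of_find?_eq_some hf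
    have hpe : p.1 = PySem.Chars.lower head := by
      have := List.find?_some hf
      simp only [beq_iff_eq] at this
      exact this.symm
    have hcont : PySem.Set.contains verbSet (PySem.Chars.lower head) = true := by
      rw [verbSet_keys]
      have : PySem.Chars.lower head ∈ verbsA.map Prod.fst :=
        List.mem_map.mpr ⟨p, hpmem, hpe⟩
      simpa [PySem.Set.contains] using this
    rw [if_pos hcont]
    simp only [Option.map_some]
    have hlen : p.1.length = head.length := by
      rw [hpe]; exact List.length_map ..
    rw [hlen, strip_tail head rest hg]
    have hcp : pyCapitalize (PySem.Chars.lower head) = p.2 := by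
      rw [← hpe, ← hcap p hpmem]
    rcases hq : p.2 with _ | ⟨c0, p2'⟩
    · exact absurd hq (hp2 p hpmem).1
    have hc0 : PySem.Chars.isspace c0 = false := by
      have := (hp2 p hpmem).2
      rwa [hq] at this
    have hdot : PySem.Chars.isspace '.' = false := by decide
    rw [hcp, hq]
    rcases rest with _ | ⟨u, ts'⟩
    · rw [if_neg (by decide)]
      simp only [List.append_nil, List.cons_append]
      rw [strip_cons_append c0 p2' '.' hc0 hdot, PySem.Chars.join_singleton]
      simp
    · have hjne := join_ne_nil (u :: ts') (fun t ht => hg t (by simp [ht])) (by simp)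
      rw [if_pos hjne]
      simp only [List.cons_append]
      rw [strip_cons_append c0 (p2' ++ ' ' :: PySem.Chars.join [' '] (u :: ts')) '.' hc0 hdot,
        PySem.Chars.join_cons_cons]
      simp

-- ===== VERDICT (by name: the statement is the Claim_ definition above) =====
theorem summary_from_name_py_spec : Claim_equal_summary_from_name_py := by
  intro name _
  unfold Spec_summary_from_name_py summary_from_name_py summary_from_name_py_alt snakeToWords
  have hg := split₀_good (PySem.Chars.replace name.toList ['_'] [' '])
  rw [List.filter_eq_self.mpr (fun t ht => by
        simpa [List.isEmpty_iff] using (hg t ht).1)]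
  rcases hs : PySem.Chars.split₀ (PySem.Chars.replace name.toList ['_'] [' ']) with _ | ⟨head, rest⟩
  · decide
  · rw [hs] at hg
    simpa using core_eq_cons head rest hg
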